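-- pv_equiv track=rewrite | github.com/nehashetty3/AutoDiligence | backend/analytics/industry_benchmark.py | detect_industry
-- ===== SOURCE A (Python) =====
-- def detect_industry(company_name: str, ticker: str) -> str:
--     name = (company_name or "").lower()
--     ticker = (ticker or "").upper()
--
--     if any(w in name for w in [
--         "bank", "finance", "financial", "invest", "capital", "insurance", "payments",
--         "goldman", "jpmorgan", "morgan stanley", "blackrock", "hdfc", "icici", "fifth third",
--         "state street", "bancshares", "mellon", "pnc"
--     ]) or ticker in {"GS", "JPM", "MS", "BK", "PNC", "STT", "FITB", "HBAN", "HDB", "IBN", "BLK"}: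
--         return "finance"
--
--     if any(w in name for w in [
--         "software", "cloud", "data", "digital", "technology", "technologies", "semiconductor",
--         "ai", "cyber", "internet", "meta", "microsoft", "apple", "amazon", "nvidia",
--         "infosys", "wipro", "consultancy", "hcl"
--     ]) or ticker in {"MSFT", "AAPL", "AMZN", "META", "NVDA", "INFY", "WIT", "TCS", "TCS.NS", "HCLTECH.NS", "BTCS"}:
--         return "technology"
--
--     if any(w in name for w in [
--         "pharma", "health", "medical", "bio", "biotech", "hospital", "therapeutics"
--     ]):
--         return "healthcare"
--
--     if any(w in name for w in [
--         "oil", "gas", "energy", "petro", "power", "solar", "renewable"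
--     ]):
--         return "energy"
--
--     if any(w in name for w in [
--         "retail", "consumer", "store", "mart", "ecommerce", "shop"
--     ]):
--         return "retail"
--
--     if any(w in name for w in [
--         "auto", "motor", "vehicle", "car", "automotive", "tesla", "toyota", "volkswagen"
--     ]) or ticker in {"TSLA", "TM", "VOW.PR"}:
--         return "automotive"
--
--     if any(w in name for w in [
--         "telecom", "wireless", "network", "mobile"
--     ]):
--         return "telecom"
--
--     if any(w in name for w in [
--         "industrial", "manufacturing", "steel", "mining", "cement", "infrastructure", "port"
--     ]):
--         return "industrial"
--
--     return "default"
-- ===== SOURCE B (Python) =====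
-- _RULES = [
--     ("finance",
--      ["bank", "finance", "financial", "invest", "capital", "insurance", "payments",
--       "goldman", "jpmorgan", "morgan stanley", "blackrock", "hdfc", "icici", "fifth third",
--       "state street", "bancshares", "mellon", "pnc"],
--      ["GS", "JPM", "MS", "BK", "PNC", "STT", "FITB", "HBAN", "HDB", "IBN", "BLK"]),
--     ("technology",
--      ["software", "cloud", "data", "digital", "technology", "technologies", "semiconductor",
--       "ai", "cyber", "internet", "meta", "microsoft", "apple", "amazon", "nvidia",
--       "infosys", "wipro", "consultancy", "hcl"],
--      ["MSFT", "AAPL", "AMZN", "META", "NVDA", "INFY", "WIT", "TCS", "TCS.NS", "HCLTECH.NS", "BTCS"]),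
--     ("healthcare",
--      ["pharma", "health", "medical", "bio", "biotech", "hospital", "therapeutics"], []),
--     ("energy",
--      ["oil", "gas", "energy", "petro", "power", "solar", "renewable"], []),
--     ("retail",
--      ["retail", "consumer", "store", "mart", "ecommerce", "shop"], []),
--     ("automotive",
--      ["auto", "motor", "vehicle", "car", "automotive", "tesla", "toyota", "volkswagen"],
--      ["TSLA", "TM", "VOW.PR"]),
--     ("telecom",
--      ["telecom", "wireless", "network", "mobile"], []),
--     ("industrial",
--      ["industrial", "manufacturing", "steel", "mining", "cement", "infrastructure", "port"], []),
-- ]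
-- _NRULES = len(_RULES)
--
-- # Inverted indexes: keyword -> priority of its industry, ticker -> priority.
-- _KW = {w: p for p, (_label, _kws, _tks) in enumerate(_RULES) for w in _kws}
-- _TK = {t: p for p, (_label, _kws, _tks) in enumerate(_RULES) for t in _tks}
-- _LENS = sorted({len(w) for w in _KW})
-- _LABELS = [r[0] for r in _RULES] + ["default"]
--
--
-- def detect_industry(company_name: str, ticker: str) -> str:
--     name = (company_name or "").lower()
--     ticker = (ticker or "").upper()
--     # Scan the company name once: every substring whose length is a keyword
--     # length is looked up in the inverted index; keep the best (lowest) priority.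
--     kbest = min((_KW[name[i:i + L]] for i in range(len(name)) for L in _LENS
--                  if name[i:i + L] in _KW), default=_NRULES)
--     best = min(kbest, _TK.get(ticker, _NRULES))
--     return _LABELS[best]
-- ===== Notes on version B (the rewrite author's own statement) =====
-- stated objective: alternative
-- what changed: Replaced the eight-branch if-cascade of per-industry keyword scans by an inverted index (keyword -> rule priority, ticker -> rule priority) consulted while scanning the company name's substrings once, returning the label of the minimum matched priority.
import Mathlib
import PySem

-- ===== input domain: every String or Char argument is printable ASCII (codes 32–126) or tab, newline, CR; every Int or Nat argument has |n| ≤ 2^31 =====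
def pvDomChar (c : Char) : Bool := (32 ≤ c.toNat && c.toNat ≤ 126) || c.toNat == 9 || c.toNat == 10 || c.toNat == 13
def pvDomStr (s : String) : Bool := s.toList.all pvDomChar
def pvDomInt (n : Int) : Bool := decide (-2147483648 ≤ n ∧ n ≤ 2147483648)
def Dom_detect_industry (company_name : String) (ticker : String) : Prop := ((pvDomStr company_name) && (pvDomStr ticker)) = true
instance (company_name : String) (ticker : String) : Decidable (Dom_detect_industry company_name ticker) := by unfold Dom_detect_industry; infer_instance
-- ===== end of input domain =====

-- B replaces A's eight-branch keyword cascade by an inverted index (keyword -> rule priority,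
-- ticker -> rule priority): it scans the company name's substrings once, looks each up in the
-- index and returns the label of the minimum matched priority (objective: alternative).

-- ===== PORT A =====
def detect_industry (company_name : String) (ticker : String) : String :=
  let name := PySem.Str.lower company_name
  let ticker := PySem.Str.upper ticker
  if (["bank", "finance", "financial", "invest", "capital", "insurance", "payments",
       "goldman", "jpmorgan", "morgan stanley", "blackrock", "hdfc", "icici", "fifth third",
       "state street", "bancshares", "mellon", "pnc"].any (fun w => PySem.Str.isIn w name))
     || (["GS", "JPM", "MS", "BK", "PNC", "STT", "FITB", "HBAN", "HDB", "IBN", "BLK"].contains ticker) then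
    "finance"
  else if (["software", "cloud", "data", "digital", "technology", "technologies", "semiconductor",
       "ai", "cyber", "internet", "meta", "microsoft", "apple", "amazon", "nvidia",
       "infosys", "wipro", "consultancy", "hcl"].any (fun w => PySem.Str.isIn w name))
     || (["MSFT", "AAPL", "AMZN", "META", "NVDA", "INFY", "WIT", "TCS", "TCS.NS", "HCLTECH.NS", "BTCS"].contains ticker) then
    "technology"
  else if ["pharma", "health", "medical", "bio", "biotech", "hospital", "therapeutics"].any (fun w => PySem.Str.isIn w name) then
    "healthcare"
  else if ["oil", "gas", "energy", "petro", "power", "solar", "renewable"].any (fun w => PySem.Str.isIn w name) then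
    "energy"
  else if ["retail", "consumer", "store", "mart", "ecommerce", "shop"].any (fun w => PySem.Str.isIn w name) then
    "retail"
  else if (["auto", "motor", "vehicle", "car", "automotive", "tesla", "toyota", "volkswagen"].any (fun w => PySem.Str.isIn w name))
     || (["TSLA", "TM", "VOW.PR"].contains ticker) then
    "automotive"
  else if ["telecom", "wireless", "network", "mobile"].any (fun w => PySem.Str.isIn w name) then
    "telecom"
  else if ["industrial", "manufacturing", "steel", "mining", "cement", "infrastructure", "port"].any (fun w => PySem.Str.isIn w name) then
    "industrial"
  else
    "default"

-- ===== PORT B =====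
-- _RULES of Source B
def pvRules : List (String × List String × List String) :=
  [("finance",
    ["bank", "finance", "financial", "invest", "capital", "insurance", "payments",
     "goldman", "jpmorgan", "morgan stanley", "blackrock", "hdfc", "icici", "fifth third",
     "state street", "bancshares", "mellon", "pnc"],
    ["GS", "JPM", "MS", "BK", "PNC", "STT", "FITB", "HBAN", "HDB", "IBN", "BLK"]),
   ("technology",
    ["software", "cloud", "data", "digital", "technology", "technologies", "semiconductor",
     "ai", "cyber", "internet", "meta", "microsoft", "apple", "amazon", "nvidia",
     "infosys", "wipro", "consultancy", "hcl"],
    ["MSFT", "AAPL", "AMZN", "META", "NVDA", "INFY", "WIT", "TCS", "TCS.NS", "HCLTECH.NS", "BTCS"]),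
   ("healthcare",
    ["pharma", "health", "medical", "bio", "biotech", "hospital", "therapeutics"], []),
   ("energy",
    ["oil", "gas", "energy", "petro", "power", "solar", "renewable"], []),
   ("retail",
    ["retail", "consumer", "store", "mart", "ecommerce", "shop"], []),
   ("automotive",
    ["auto", "motor", "vehicle", "car", "automotive", "tesla", "toyota", "volkswagen"],
    ["TSLA", "TM", "VOW.PR"]),
   ("telecom",
    ["telecom", "wireless", "network", "mobile"], []),
   ("industrial",
    ["industrial", "manufacturing", "steel", "mining", "cement", "infrastructure", "port"], [])]

def pvNRules : Int := (pvRules.length : Int)                      -- _NRULES = len(_RULES)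

-- _KW = {w: p for p, (...) in enumerate(_RULES) for w in kws}  (inverted keyword index)
def pvKW : PySem.Dict String Int :=
  (PySem.List.enumerate pvRules).foldl
    (fun d pr => pr.2.2.1.foldl (fun d w => d.insert w pr.1) d) PySem.Dict.empty

-- _TK = {t: p for p, (...) in enumerate(_RULES) for t in tks}  (inverted ticker index)
def pvTK : PySem.Dict String Int :=
  (PySem.List.enumerate pvRules).foldl
    (fun d pr => pr.2.2.2.foldl (fun d s => d.insert s pr.1) d) PySem.Dict.empty

-- _LENS = sorted({len(w) for w in _KW})
def pvLens : List Int :=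
  PySem.List.sorted (PySem.Set.ofList (pvKW.keys.map PySem.Str.len)) (fun x => x)

-- _LABELS = [r[0] for r in _RULES] + ["default"]
def pvLabels : List String := pvRules.map (fun r => r.1) ++ ["default"]

-- _candidates(name): priorities of every indexed keyword occurring as a substring of name
def pvCandidates (name : String) : List Int :=
  (PySem.List.pyRange 0 (PySem.Str.len name)).flatMap (fun i =>
    pvLens.filterMap (fun L => pvKW.get? (PySem.Str.slice name (some i) (some (i + L)))))

def detect_industry_alt (company_name : String) (ticker : String) : String :=
  let name := PySem.Str.lower company_name
  let ticker := PySem.Str.upper ticker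
  let kbest := PySem.List.minD (pvCandidates name) (fun x => x) pvNRules
  let best := min kbest (pvTK.getD ticker pvNRules)
  (PySem.List.pyGet? pvLabels best).getD "default"   -- _LABELS[best]; best ∈ [0,8] always, so never out of range

-- ===== PRECONDITION & SPEC =====
def Spec_detect_industry (company_name : String) (ticker : String) (out : String) : Prop := out = detect_industry_alt company_name ticker
instance (company_name : String) (ticker : String) (out : String) : Decidable (Spec_detect_industry company_name ticker out) := by unfold Spec_detect_industry; infer_instance

-- ===== CLAIM (what is proved, stated in full; the proofs are below) =====
def Claim_equal_detect_industry : Prop := ∀ (company_name : String) (ticker : String), Dom_detect_industry company_name ticker → Spec_detect_industry company_name ticker (detect_industry company_name ticker)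

-- ===== LEMMAS AND PROOFS =====

-- the keyword / ticker lists of rule k, as A's cascade tests them
def wordsOf : Nat → List String
  | 0 => ["bank", "finance", "financial", "invest", "capital", "insurance", "payments",
          "goldman", "jpmorgan", "morgan stanley", "blackrock", "hdfc", "icici", "fifth third",
          "state street", "bancshares", "mellon", "pnc"]
  | 1 => ["software", "cloud", "data", "digital", "technology", "technologies", "semiconductor",
          "ai", "cyber", "internet", "meta", "microsoft", "apple", "amazon", "nvidia",
          "infosys", "wipro", "consultancy", "hcl"]
  | 2 => ["pharma", "health", "medical", "bio", "biotech", "hospital", "therapeutics"]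
  | 3 => ["oil", "gas", "energy", "petro", "power", "solar", "renewable"]
  | 4 => ["retail", "consumer", "store", "mart", "ecommerce", "shop"]
  | 5 => ["auto", "motor", "vehicle", "car", "automotive", "tesla", "toyota", "volkswagen"]
  | 6 => ["telecom", "wireless", "network", "mobile"]
  | 7 => ["industrial", "manufacturing", "steel", "mining", "cement", "infrastructure", "port"]
  | _ => []

def tickersOf : Nat → List String
  | 0 => ["GS", "JPM", "MS", "BK", "PNC", "STT", "FITB", "HBAN", "HDB", "IBN", "BLK"]
  | 1 => ["MSFT", "AAPL", "AMZN", "META", "NVDA", "INFY", "WIT", "TCS", "TCS.NS", "HCLTECH.NS", "BTCS"]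
  | 5 => ["TSLA", "TM", "VOW.PR"]
  | _ => []

-- rule k's test, as one boolean
def condOf (name t : String) (k : Nat) : Bool :=
  (wordsOf k).any (fun w => PySem.Str.isIn w name) || (tickersOf k).contains t

-- the priority B ends up with
def bestOf (name t : String) : Int :=
  min (PySem.List.minD (pvCandidates name) (fun x => x) pvNRules) (pvTK.getD t pvNRules)

lemma alt_eq (cn tk : String) :
    detect_industry_alt cn tk =
      (PySem.List.pyGet? pvLabels (bestOf (PySem.Str.lower cn) (PySem.Str.upper tk))).getD "default" := rfl

-- the two inverted indexes and the length list, written out (checked by evaluation once)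
def pvKWlit : List (String × Int) :=
  [("bank", 0),
   ("finance", 0),
   ("financial", 0),
   ("invest", 0),
   ("capital", 0),
   ("insurance", 0),
   ("payments", 0),
   ("goldman", 0),
   ("jpmorgan", 0),
   ("morgan stanley", 0),
   ("blackrock", 0),
   ("hdfc", 0),
   ("icici", 0),
   ("fifth third", 0),
   ("state street", 0),
   ("bancshares", 0),
   ("mellon", 0),
   ("pnc", 0),
   ("software", 1),
   ("cloud", 1),
   ("data", 1),
   ("digital", 1),
   ("technology", 1),
   ("technologies", 1),
   ("semiconductor", 1),
   ("ai", 1),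
   ("cyber", 1),
   ("internet", 1),
   ("meta", 1),
   ("microsoft", 1),
   ("apple", 1),
   ("amazon", 1),
   ("nvidia", 1),
   ("infosys", 1),
   ("wipro", 1),
   ("consultancy", 1),
   ("hcl", 1),
   ("pharma", 2),
   ("health", 2),
   ("medical", 2),
   ("bio", 2),
   ("biotech", 2),
   ("hospital", 2),
   ("therapeutics", 2),
   ("oil", 3),
   ("gas", 3),
   ("energy", 3),
   ("petro", 3),
   ("power", 3),
   ("solar", 3),
   ("renewable", 3),
   ("retail", 4),
   ("consumer", 4),
   ("store", 4),
   ("mart", 4),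
   ("ecommerce", 4),
   ("shop", 4),
   ("auto", 5),
   ("motor", 5),
   ("vehicle", 5),
   ("car", 5),
   ("automotive", 5),
   ("tesla", 5),
   ("toyota", 5),
   ("volkswagen", 5),
   ("telecom", 6),
   ("wireless", 6),
   ("network", 6),
   ("mobile", 6),
   ("industrial", 7),
   ("manufacturing", 7),
   ("steel", 7),
   ("mining", 7),
   ("cement", 7),
   ("infrastructure", 7),
   ("port", 7)]

def pvTKlit : List (String × Int) :=
  [("GS", 0),
   ("JPM", 0),
   ("MS", 0),
   ("BK", 0),
   ("PNC", 0),
   ("STT", 0),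
   ("FITB", 0),
   ("HBAN", 0),
   ("HDB", 0),
   ("IBN", 0),
   ("BLK", 0),
   ("MSFT", 1),
   ("AAPL", 1),
   ("AMZN", 1),
   ("META", 1),
   ("NVDA", 1),
   ("INFY", 1),
   ("WIT", 1),
   ("TCS", 1),
   ("TCS.NS", 1),
   ("HCLTECH.NS", 1),
   ("BTCS", 1),
   ("TSLA", 5),
   ("TM", 5),
   ("VOW.PR", 5)]

set_option maxRecDepth 40000 in
lemma pvKW_items_eq : pvKW.items = pvKWlit := by decide

set_option maxRecDepth 40000 in
lemma pvTK_items_eq : pvTK.items = pvTKlit := by decide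

lemma pvKW_eq : pvKW = PySem.Dict.mk pvKWlit := PySem.Dict.ext pvKW_items_eq

lemma pvTK_eq : pvTK = PySem.Dict.mk pvTKlit := PySem.Dict.ext pvTK_items_eq

set_option maxRecDepth 40000 in
lemma pvLens_eq : pvLens = [2, 3, 4, 5, 6, 7, 8, 9, 10, 11, 12, 13, 14] := by decide

lemma fact_nrules : pvNRules = 8 := rfl

-- finite facts about the inverted indexes (checked by evaluation)
set_option maxRecDepth 40000 in
lemma fact_kw_items : ∀ kv ∈ pvKW.items,
    0 ≤ kv.2 ∧ kv.2 < 8 ∧ kv.1 ∈ wordsOf kv.2.toNat ∧ PySem.Str.len kv.1 ∈ pvLens ∧ kv.1.toList ≠ [] := by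
  rw [pvKW_items_eq]; simp only [pvLens_eq]; decide

set_option maxRecDepth 40000 in
lemma fact_kw_lookup : ∀ k : Nat, k < 8 → ∀ w ∈ wordsOf k, pvKW.get? w = some (k : Int) := by
  simp only [pvKW_eq]; decide

set_option maxRecDepth 40000 in
lemma fact_tk_items : ∀ kv ∈ pvTK.items, 0 ≤ kv.2 ∧ kv.2 < 8 ∧ kv.1 ∈ tickersOf kv.2.toNat := by
  rw [pvTK_items_eq]; decide

set_option maxRecDepth 40000 in
lemma fact_tk_lookup : ∀ k : Nat, k < 8 → ∀ s ∈ tickersOf k, pvTK.get? s = some (k : Int) := by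
  simp only [pvTK_eq]; decide

set_option maxRecDepth 40000 in
lemma fact_lens : ∀ L ∈ pvLens, 0 ≤ L := by rw [pvLens_eq]; decide

-- membership in the candidate list = an indexed keyword occurs in the name
lemma mem_candidates {name : String} {p : Int} :
    p ∈ pvCandidates name ↔ ∃ w : String, pvKW.get? w = some p ∧ PySem.Str.isIn w name = true := by
  simp only [pvCandidates, List.mem_flatMap, List.mem_filterMap]
  constructor
  · rintro ⟨i, hi, L, hL, hget⟩
    refine ⟨_, hget, ?_⟩
    rw [PySem.Str.isIn_iff_infix, PySem.Str.toList_slice, PySem.Chars.slice_eq_listSlice]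
    obtain ⟨h0i, -⟩ := PySem.List.mem_pyRange_one.mp hi
    rw [PySem.List.slice_toNat _ h0i (by have := fact_lens L hL; omega)]
    exact ((List.take_prefix _ _).isInfix).trans ((List.drop_suffix _ _).isInfix)
  · rintro ⟨w, hw, hin⟩
    have hitem := PySem.Dict.mem_items_of_get?_eq_some pvKW hw
    obtain ⟨-, -, -, hlenmem, hne⟩ := fact_kw_items _ hitem
    have hin' : PySem.Chars.isIn w.toList name.toList = true := by
      rw [← PySem.Str.isIn_eq]; exact hin
    obtain ⟨j, hpre⟩ := (PySem.Chars.exists_prefix_drop_iff_isIn _ _).mpr hin'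
    have hjlt : j < name.toList.length := by
      by_contra hge
      push_neg at hge
      rw [List.drop_eq_nil_of_le hge] at hpre
      exact hne (List.prefix_nil.mp hpre)
    refine ⟨(j : Int), ?_, PySem.Str.len w, hlenmem, ?_⟩
    · rw [PySem.List.mem_pyRange_one, PySem.Str.len_eq]
      exact ⟨Int.natCast_nonneg j, by exact_mod_cast hjlt⟩
    · have hsl : PySem.Str.slice name (some (j : Int)) (some ((j : Int) + PySem.Str.len w)) = w := by
        apply String.toList_injective
        rw [PySem.Str.toList_slice, PySem.Chars.slice_eq_listSlice, PySem.Str.len_eq,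
            PySem.List.slice_natCast_add]
        exact (List.prefix_iff_eq_take.mp hpre).symm
      rw [hsl]
      exact hw

-- minD facts
lemma minD_le {xs : List Int} {d p : Int} (hp : p ∈ xs) :
    PySem.List.minD xs (fun x => x) d ≤ p := by
  unfold PySem.List.minD
  cases h : PySem.List.min? xs (fun x => x) with
  | none =>
    rw [(PySem.List.min?_eq_none_iff xs _).mp h] at hp
    cases hp
  | some m =>
    simpa using PySem.List.min?_isMin h p hp

lemma minD_cases (xs : List Int) (d : Int) :
    PySem.List.minD xs (fun x => x) d = d ∨ PySem.List.minD xs (fun x => x) d ∈ xs := by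
  unfold PySem.List.minD
  cases h : PySem.List.min? xs (fun x => x) with
  | none => left; rfl
  | some m => right; simpa using PySem.List.min?_mem h

-- soundness / completeness of the candidate list w.r.t. A's per-rule tests
lemma cands_sound {name : String} {p : Int} (hp : p ∈ pvCandidates name) :
    0 ≤ p ∧ p < 8 ∧ ((wordsOf p.toNat).any (fun w => PySem.Str.isIn w name)) = true := by
  obtain ⟨w, hw, hin⟩ := mem_candidates.mp hp
  obtain ⟨h0, h8, hmem, -, -⟩ := fact_kw_items _ (PySem.Dict.mem_items_of_get?_eq_some pvKW hw)
  exact ⟨h0, h8, List.any_eq_true.mpr ⟨w, hmem, hin⟩⟩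

lemma cands_complete {name : String} {k : Nat} (hk : k < 8)
    (h : (wordsOf k).any (fun w => PySem.Str.isIn w name) = true) :
    (k : Int) ∈ pvCandidates name := by
  obtain ⟨w, hwmem, hin⟩ := List.any_eq_true.mp h
  exact mem_candidates.mpr ⟨w, fact_kw_lookup k hk w hwmem, hin⟩

-- the ticker index value
lemma tk_cases (t : String) :
    pvTK.getD t pvNRules = pvNRules ∨
      (0 ≤ pvTK.getD t pvNRules ∧ pvTK.getD t pvNRules < 8 ∧
        ((tickersOf (pvTK.getD t pvNRules).toNat).contains t) = true) := by
  rw [PySem.Dict.getD_eq_get?_getD]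
  cases h : pvTK.get? t with
  | none => left; rfl
  | some v =>
    right
    obtain ⟨h0, h8, hmem⟩ := fact_tk_items _ (PySem.Dict.mem_items_of_get?_eq_some pvTK h)
    simp only [Option.getD_some]
    exact ⟨h0, h8, List.contains_iff_mem.mpr hmem⟩

lemma tk_le {t : String} {k : Nat} (hk : k < 8) (h : (tickersOf k).contains t = true) :
    pvTK.getD t pvNRules = (k : Int) := by
  rw [PySem.Dict.getD_eq_get?_getD, fact_tk_lookup k hk t (List.contains_iff_mem.mp h)]
  rfl

lemma best_eq_of (name t : String) (k : Nat) (hk : k < 8)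
    (hcond : condOf name t k = true)
    (hprev : ∀ j : Nat, j < k → condOf name t j = false) :
    bestOf name t = (k : Int) := by
  have hk' : (k : Int) < 8 := by exact_mod_cast hk
  have hub : bestOf name t ≤ (k : Int) := by
    unfold bestOf
    by_cases hany : (wordsOf k).any (fun w => PySem.Str.isIn w name) = true
    · exact le_trans (min_le_left _ _) (minD_le (cands_complete hk hany))
    · have htk : (tickersOf k).contains t = true := by
        unfold condOf at hcond
        rw [Bool.eq_false_iff.mpr hany, Bool.false_or] at hcond
        exact hcond
      exact le_trans (min_le_right _ _) (le_of_eq (tk_le hk htk))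
  have hlb : (k : Int) ≤ bestOf name t := by
    unfold bestOf
    apply le_min
    · rcases minD_cases (pvCandidates name) pvNRules with he | hm
      · rw [he, fact_nrules]; omega
      · obtain ⟨h0p, hp8, hany⟩ := cands_sound hm
        by_contra hlt
        push_neg at hlt
        have hplt : (PySem.List.minD (pvCandidates name) (fun x => x) pvNRules).toNat < k := by omega
        have hfalse := hprev _ hplt
        unfold condOf at hfalse
        rw [hany] at hfalse
        simp at hfalse
    · rcases tk_cases t with he | ⟨h0, h8, hc⟩
      · rw [he, fact_nrules]; omega
      · by_contra hlt
        push_neg at hlt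
        have hplt : (pvTK.getD t pvNRules).toNat < k := by omega
        have hfalse := hprev _ hplt
        unfold condOf at hfalse
        rw [hc] at hfalse
        simp at hfalse
  exact le_antisymm hub hlb

lemma best_default (name t : String)
    (hall : ∀ j : Nat, j < 8 → condOf name t j = false) :
    bestOf name t = 8 := by
  unfold bestOf
  have h1 : PySem.List.minD (pvCandidates name) (fun x => x) pvNRules = pvNRules := by
    rcases minD_cases (pvCandidates name) pvNRules with he | hm
    · exact he
    · obtain ⟨h0p, hp8, hany⟩ := cands_sound hm
      have hfalse := hall _ (by omega :
        (PySem.List.minD (pvCandidates name) (fun x => x) pvNRules).toNat < 8)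
      unfold condOf at hfalse
      rw [hany] at hfalse
      simp at hfalse
  have h2 : pvTK.getD t pvNRules = pvNRules := by
    rcases tk_cases t with he | ⟨h0, h8, hc⟩
    · exact he
    · have hfalse := hall _ (by omega : (pvTK.getD t pvNRules).toNat < 8)
      unfold condOf at hfalse
      rw [hc] at hfalse
      simp at hfalse
  rw [h1, h2, fact_nrules, min_self]

lemma condOf_false_of_not {name t : String} {k : Nat}
    (h : ¬ ((wordsOf k).any (fun w => PySem.Str.isIn w name) || (tickersOf k).contains t) = true) :
    condOf name t k = false := Bool.eq_false_iff.mpr h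

lemma condOf_false_kwonly {name t : String} {k : Nat} (he : tickersOf k = [])
    (h : ¬ ((wordsOf k).any (fun w => PySem.Str.isIn w name)) = true) :
    condOf name t k = false := by
  unfold condOf
  rw [he, Bool.eq_false_iff.mpr h]
  rfl

lemma condOf_true_kw {name t : String} {k : Nat}
    (h : (wordsOf k).any (fun w => PySem.Str.isIn w name) = true) :
    condOf name t k = true := by
  unfold condOf
  rw [h]
  rfl

-- ===== VERDICT (by name: the statement is the Claim_ definition above) =====
theorem detect_industry_spec : Claim_equal_detect_industry := by
  intro cn tk _
  unfold Spec_detect_industry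
  rw [alt_eq]
  simp only [detect_industry]
  split_ifs with h0 h1 h2 h3 h4 h5 h6 h7
  · rw [best_eq_of _ _ 0 (by omega) h0 (fun j hj => absurd hj (Nat.not_lt_zero j))]; rfl
  · rw [best_eq_of _ _ 1 (by omega) h1 ?_]
    · rfl
    · intro j hj; interval_cases j
      · exact condOf_false_of_not h0
  · rw [best_eq_of _ _ 2 (by omega) (condOf_true_kw h2) ?_]
    · rfl
    · intro j hj; interval_cases j
      · exact condOf_false_of_not h0
      · exact condOf_false_of_not h1
  · rw [best_eq_of _ _ 3 (by omega) (condOf_true_kw h3) ?_]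
    · rfl
    · intro j hj; interval_cases j
      · exact condOf_false_of_not h0
      · exact condOf_false_of_not h1
      · exact condOf_false_kwonly rfl h2
  · rw [best_eq_of _ _ 4 (by omega) (condOf_true_kw h4) ?_]
    · rfl
    · intro j hj; interval_cases j
      · exact condOf_false_of_not h0
      · exact condOf_false_of_not h1
      · exact condOf_false_kwonly rfl h2
      · exact condOf_false_kwonly rfl h3
  · rw [best_eq_of _ _ 5 (by omega) h5 ?_]
    · rfl
    · intro j hj; interval_cases j
      · exact condOf_false_of_not h0
      · exact condOf_false_of_not h1
      · exact condOf_false_kwonly rfl h2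
      · exact condOf_false_kwonly rfl h3
      · exact condOf_false_kwonly rfl h4
  · rw [best_eq_of _ _ 6 (by omega) (condOf_true_kw h6) ?_]
    · rfl
    · intro j hj; interval_cases j
      · exact condOf_false_of_not h0
      · exact condOf_false_of_not h1
      · exact condOf_false_kwonly rfl h2
      · exact condOf_false_kwonly rfl h3
      · exact condOf_false_kwonly rfl h4
      · exact condOf_false_of_not h5
  · rw [best_eq_of _ _ 7 (by omega) (condOf_true_kw h7) ?_]
    · rfl
    · intro j hj; interval_cases j
      · exact condOf_false_of_not h0
      · exact condOf_false_of_not h1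
      · exact condOf_false_kwonly rfl h2
      · exact condOf_false_kwonly rfl h3
      · exact condOf_false_kwonly rfl h4
      · exact condOf_false_of_not h5
      · exact condOf_false_kwonly rfl h6
  · rw [best_default _ _ ?_]
    · rfl
    · intro j hj; interval_cases j
      · exact condOf_false_of_not h0
      · exact condOf_false_of_not h1
      · exact condOf_false_kwonly rfl h2
      · exact condOf_false_kwonly rfl h3
      · exact condOf_false_kwonly rfl h4
      · exact condOf_false_of_not h5
      · exact condOf_false_kwonly rfl h6
      · exact condOf_false_kwonly rfl h7
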